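-- pv_equiv track=rewrite | github.com/bryanc5864/nest-drug | scripts/experiments/dmta_replay.py | compute_experiments_to_n_hits
-- ===== SOURCE A (Python) =====
-- def compute_experiments_to_n_hits(results, target_hits=50):
--     """How many experiments needed to find N hits?"""
--     cumulative = {'random': 0, 'model_no_l3': 0, 'model_l3': 0}
--     experiments = {'random': 0, 'model_no_l3': 0, 'model_l3': 0}
--
--     for r in results:
--         for method, key in [('random', 'random_hits'), ('model_no_l3', 'model_no_l3_hits'),
--                             ('model_l3', 'model_l3_hits')]:
--             if cumulative[method] < target_hits:
--                 cumulative[method] += r[key]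
--                 experiments[method] += r['n_selected']
--
--     return experiments, cumulative
-- ===== SOURCE B (Python) =====
-- def compute_experiments_to_n_hits(results, target_hits=50):
--     """How many experiments needed to find N hits?"""
--     def run(hit_key):
--         cum = 0
--         exp = 0
--         for r in results:
--             if cum >= target_hits:
--                 break
--             cum += r[hit_key]
--             exp += r['n_selected']
--         return exp, cum
--     er, cr = run('random_hits')
--     en, cn = run('model_no_l3_hits')
--     el, cl = run('model_l3_hits')
--     experiments = {'random': er, 'model_no_l3': en, 'model_l3': el}
--     cumulative = {'random': cr, 'model_no_l3': cn, 'model_l3': cl}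
--     return experiments, cumulative
-- ===== Notes on version B (the rewrite author's own statement) =====
-- stated objective: alternative
-- what changed: Replaces the single interleaved pass (one loop over results with an inner loop over the three methods updating two dicts) by three independent per-method scalar passes, each with an early break once its method reaches target_hits, assembling the dicts at the end.
import Mathlib
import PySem

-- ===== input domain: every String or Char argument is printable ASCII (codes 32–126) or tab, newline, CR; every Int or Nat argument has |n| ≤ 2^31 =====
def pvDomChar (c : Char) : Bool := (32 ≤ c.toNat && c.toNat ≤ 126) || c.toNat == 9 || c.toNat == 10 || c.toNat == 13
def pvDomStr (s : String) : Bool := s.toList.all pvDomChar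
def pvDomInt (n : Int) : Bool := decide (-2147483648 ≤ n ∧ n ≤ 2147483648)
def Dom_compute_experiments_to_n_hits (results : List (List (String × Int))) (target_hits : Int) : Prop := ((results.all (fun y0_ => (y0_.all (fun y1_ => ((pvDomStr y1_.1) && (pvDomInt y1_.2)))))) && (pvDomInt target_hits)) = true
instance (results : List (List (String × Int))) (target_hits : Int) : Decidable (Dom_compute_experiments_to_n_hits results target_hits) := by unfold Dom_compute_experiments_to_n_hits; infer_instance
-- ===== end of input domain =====

-- B replaces A's single interleaved pass (inner loop over the three methods, two dicts as state)
-- by three independent per-method scalar passes with an early break; same O(n) cost (objective: alternative).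

-- shared primitive: r[k] as first-match association-list lookup (rows are Python dicts).
-- Under Pre_ every lookup either hits an existing key or is never reached, so the default 0 is never the result.
def pvRowGet (r : List (String × Int)) (k : String) : Int :=
  ((r.find? (fun p => p.1 == k)).map (·.2)).getD 0

-- ===== PORT A =====
def pvMethods : List (String × String) :=
  [("random", "random_hits"), ("model_no_l3", "model_no_l3_hits"), ("model_l3", "model_l3_hits")]

def pvInitDict : PySem.Dict String Int :=
  ((PySem.Dict.empty.insert "random" 0).insert "model_no_l3" 0).insert "model_l3" 0

-- the body of A's outer loop: for each (method, key), conditionally update both dicts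
def pvStepA (target_hits : Int) (st : PySem.Dict String Int × PySem.Dict String Int)
    (r : List (String × Int)) : PySem.Dict String Int × PySem.Dict String Int :=
  pvMethods.foldl (fun st mk =>
    if st.1.getD mk.1 0 < target_hits then
      (st.1.insert mk.1 (st.1.getD mk.1 0 + pvRowGet r mk.2),
       st.2.insert mk.1 (st.2.getD mk.1 0 + pvRowGet r "n_selected"))
    else st) st

def compute_experiments_to_n_hits (results : List (List (String × Int))) (target_hits : Int) :
    (List (String × Int)) × (List (String × Int)) :=
  let st := results.foldl (pvStepA target_hits) (pvInitDict, pvInitDict)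
  (st.2.items, st.1.items)

-- ===== PORT B =====
-- one per-method pass: returns (experiments, cumulative) for that hit key, breaking once cum ≥ target
def pvRunB (results : List (List (String × Int))) (target_hits : Int) (key : String)
    (cum exp : Int) : Int × Int :=
  match results with
  | [] => (exp, cum)
  | r :: rs =>
    if cum ≥ target_hits then (exp, cum)
    else pvRunB rs target_hits key (cum + pvRowGet r key) (exp + pvRowGet r "n_selected")

def compute_experiments_to_n_hits_alt (results : List (List (String × Int))) (target_hits : Int) :
    (List (String × Int)) × (List (String × Int)) :=
  let pr := pvRunB results target_hits "random_hits" 0 0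
  let pn := pvRunB results target_hits "model_no_l3_hits" 0 0
  let pl := pvRunB results target_hits "model_l3_hits" 0 0
  ([("random", pr.1), ("model_no_l3", pn.1), ("model_l3", pl.1)],
   [("random", pr.2), ("model_no_l3", pn.2), ("model_l3", pl.2)])

-- ===== PRECONDITION & SPEC =====
-- Pre_ excludes inputs where some row lacks one of the four keys while target_hits > 0: there A
-- (and B) generally raise KeyError; on the corner where all methods saturate before the malformed
-- row both Pythons still return the same value, so Pre_ is safe though slightly narrow there.
def Pre_compute_experiments_to_n_hits (results : List (List (String × Int))) (target_hits : Int) : Prop :=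
  target_hits ≤ 0 ∨
    (results.all (fun r =>
      r.any (fun p => p.1 == "random_hits") && r.any (fun p => p.1 == "model_no_l3_hits") &&
      r.any (fun p => p.1 == "model_l3_hits") && r.any (fun p => p.1 == "n_selected")) = true)
instance (results : List (List (String × Int))) (target_hits : Int) : Decidable (Pre_compute_experiments_to_n_hits results target_hits) := by unfold Pre_compute_experiments_to_n_hits; infer_instance

def pvWitness_compute_experiments_to_n_hits : (List (List (String × Int))) × Int :=
  ([[("random_hits", 1), ("model_no_l3_hits", 0), ("model_l3_hits", 2), ("n_selected", 3)]], 2)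

def Spec_compute_experiments_to_n_hits (results : List (List (String × Int))) (target_hits : Int) (out : (List (String × Int)) × (List (String × Int))) : Prop := out = compute_experiments_to_n_hits_alt results target_hits
instance (results : List (List (String × Int))) (target_hits : Int) (out : (List (String × Int)) × (List (String × Int))) : Decidable (Spec_compute_experiments_to_n_hits results target_hits out) := by unfold Spec_compute_experiments_to_n_hits; infer_instance

-- ===== CLAIM (what is proved, stated in full; the proofs are below) =====
def Claim_equal_compute_experiments_to_n_hits : Prop := ∀ (results : List (List (String × Int))) (target_hits : Int), Dom_compute_experiments_to_n_hits results target_hits → Pre_compute_experiments_to_n_hits results target_hits → Spec_compute_experiments_to_n_hits results target_hits (compute_experiments_to_n_hits results target_hits)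

-- ===== LEMMAS AND PROOFS =====

-- the canonical shapes of A's two dicts
def pvDC (a b c : Int) : PySem.Dict String Int :=
  ((PySem.Dict.empty.insert "random" a).insert "model_no_l3" b).insert "model_l3" c

lemma pvDC_ins_r (a b c x : Int) : (pvDC a b c).insert "random" x = pvDC x b c := rfl
lemma pvDC_ins_n (a b c x : Int) : (pvDC a b c).insert "model_no_l3" x = pvDC a x c := rfl
lemma pvDC_ins_l (a b c x : Int) : (pvDC a b c).insert "model_l3" x = pvDC a b x := rfl
lemma pvDC_getD_r (a b c : Int) : (pvDC a b c).getD "random" 0 = a := rfl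
lemma pvDC_getD_n (a b c : Int) : (pvDC a b c).getD "model_no_l3" 0 = b := rfl
lemma pvDC_getD_l (a b c : Int) : (pvDC a b c).getD "model_l3" 0 = c := rfl
lemma pvDC_items (a b c : Int) :
    (pvDC a b c).items = [("random", a), ("model_no_l3", b), ("model_l3", c)] := rfl

lemma pvRunB_sat (rs : List (List (String × Int))) (t : Int) (k : String) (cum exp : Int)
    (h : cum ≥ t) : pvRunB rs t k cum exp = (exp, cum) := by
  cases rs <;> simp [pvRunB, h]

lemma pvRunB_cons_split (r : List (String × Int)) (rs : List (List (String × Int)))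
    (t : Int) (k : String) (cum exp : Int) :
    pvRunB (r :: rs) t k cum exp =
      if cum < t then pvRunB rs t k (cum + pvRowGet r k) (exp + pvRowGet r "n_selected")
      else (exp, cum) := by
  simp only [pvRunB]
  rcases lt_or_ge cum t with h | h
  · rw [if_neg (not_le.mpr h), if_pos h]
  · rw [if_pos h, if_neg (not_lt.mpr h)]

lemma pvStepA_canon (t : Int) (r : List (String × Int)) (a b c d e f : Int) :
    pvStepA t (pvDC a b c, pvDC d e f) r =
      (pvDC (if a < t then a + pvRowGet r "random_hits" else a)
            (if b < t then b + pvRowGet r "model_no_l3_hits" else b)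
            (if c < t then c + pvRowGet r "model_l3_hits" else c),
       pvDC (if a < t then d + pvRowGet r "n_selected" else d)
            (if b < t then e + pvRowGet r "n_selected" else e)
            (if c < t then f + pvRowGet r "n_selected" else f)) := by
  simp only [pvStepA, pvMethods, List.foldl]
  by_cases h1 : a < t <;> by_cases h2 : b < t <;> by_cases h3 : c < t <;>
    simp only [h1, h2, h3, pvDC_getD_r, pvDC_getD_n, pvDC_getD_l,
      pvDC_ins_r, pvDC_ins_n, pvDC_ins_l, if_true, if_false]

lemma pvFold_canon (rs : List (List (String × Int))) (t : Int) (a b c d e f : Int) :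
    rs.foldl (pvStepA t) (pvDC a b c, pvDC d e f) =
      (pvDC (pvRunB rs t "random_hits" a d).2 (pvRunB rs t "model_no_l3_hits" b e).2
            (pvRunB rs t "model_l3_hits" c f).2,
       pvDC (pvRunB rs t "random_hits" a d).1 (pvRunB rs t "model_no_l3_hits" b e).1
            (pvRunB rs t "model_l3_hits" c f).1) := by
  induction rs generalizing a b c d e f with
  | nil => simp [pvRunB]
  | cons r rs ih =>
    rw [List.foldl_cons, pvStepA_canon, ih]
    simp only [pvRunB_cons_split]
    rcases lt_or_ge a t with h1 | h1 <;> rcases lt_or_ge b t with h2 | h2 <;>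
      rcases lt_or_ge c t with h3 | h3
    · simp [h1, h2, h3]
    · simp [h1, h2, not_lt_of_ge h3, pvRunB_sat rs t _ c f h3]
    · simp [h1, not_lt_of_ge h2, pvRunB_sat rs t _ b e h2, h3]
    · simp [h1, not_lt_of_ge h2, pvRunB_sat rs t _ b e h2, not_lt_of_ge h3, pvRunB_sat rs t _ c f h3]
    · simp [not_lt_of_ge h1, pvRunB_sat rs t _ a d h1, h2, h3]
    · simp [not_lt_of_ge h1, pvRunB_sat rs t _ a d h1, h2, not_lt_of_ge h3, pvRunB_sat rs t _ c f h3]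
    · simp [not_lt_of_ge h1, pvRunB_sat rs t _ a d h1, not_lt_of_ge h2, pvRunB_sat rs t _ b e h2, h3]
    · simp [not_lt_of_ge h1, pvRunB_sat rs t _ a d h1, not_lt_of_ge h2, pvRunB_sat rs t _ b e h2, not_lt_of_ge h3, pvRunB_sat rs t _ c f h3]

theorem compute_experiments_to_n_hits_spec_aux (results : List (List (String × Int))) (t : Int) :
    compute_experiments_to_n_hits results t = compute_experiments_to_n_hits_alt results t := by
  have hinit : pvInitDict = pvDC 0 0 0 := rfl
  simp only [compute_experiments_to_n_hits, compute_experiments_to_n_hits_alt, hinit,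
    pvFold_canon, pvDC_items]

-- ===== VERDICT (by name: the statement is the Claim_ definition above) =====
theorem compute_experiments_to_n_hits_spec : Claim_equal_compute_experiments_to_n_hits := by
  intro results target_hits _ _
  exact compute_experiments_to_n_hits_spec_aux results target_hits
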